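-- pv_equiv track=rewrite | github.com/Ahnho/Algorithm | programmers/Level_1/nearest_letter.py | solution
-- ===== SOURCE A (Python) =====
-- def solution(s):
--     answer = []
--     for i,st in enumerate(s):
--         a = s[0:i]
--         if st in a :
--             for i in range(len(a)):
--                 if a[-1-i] == st :
--                     answer.append(i+1)
--                     break
--         else:
--             answer.append(-1)
--
--     return answer
-- ===== SOURCE B (Python) =====
-- def solution(s):
--     answer = []
--     last = {}
--     for i, ch in enumerate(s):
--         if ch in last:
--             answer.append(i - last[ch])
--         else:
--             answer.append(-1)
--         last[ch] = i
--     return answer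
-- ===== Notes on version B (the rewrite author's own statement) =====
-- stated objective: faster
-- what changed: Replaced the per-position prefix slice plus backward scan with a single pass that records the last-seen index of each character in a dict and answers i - last[ch].
import Mathlib
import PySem

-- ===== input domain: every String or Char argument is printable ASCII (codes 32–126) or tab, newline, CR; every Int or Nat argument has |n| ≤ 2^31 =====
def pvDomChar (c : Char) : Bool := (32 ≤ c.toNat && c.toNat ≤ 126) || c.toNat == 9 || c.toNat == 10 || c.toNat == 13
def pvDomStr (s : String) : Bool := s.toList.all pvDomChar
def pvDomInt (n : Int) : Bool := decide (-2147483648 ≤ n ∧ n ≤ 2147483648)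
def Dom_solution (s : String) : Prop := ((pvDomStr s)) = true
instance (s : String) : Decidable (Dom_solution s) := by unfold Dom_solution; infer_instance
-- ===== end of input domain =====

-- B replaces A's per-position prefix rescan with a single pass keeping the last-seen index per character (objective: faster).

-- ===== PORT A =====
-- inner 'for i in range(len(a)): if a[-1-i] == st: answer.append(i+1); break'
def pvFindBack (a : List Char) (st : Char) : List Int → Option Int
  | [] => none
  | k :: ks => if PySem.List.pyGet? a (-1 - k) = some st then some (k + 1) else pvFindBack a st ks

def solution (s : String) : List Int :=
  (PySem.List.enumerate s.toList 0).foldl (fun answer p =>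
    let a := PySem.List.slice s.toList (some 0) (some p.1)   -- a = s[0:i]
    if p.2 ∈ a then
      match pvFindBack a p.2 (PySem.List.pyRange 0 (a.length : Int) 1) with
      | some v => answer ++ [v]
      | none => answer
    else answer ++ [-1]) []

-- ===== PORT B =====
def solution_alt (s : String) : List Int :=
  ((PySem.List.enumerate s.toList 0).foldl
    (fun (acc : List Int × PySem.Dict Char Int) p =>
      let ans := match acc.2.get? p.2 with
        | some j => acc.1 ++ [p.1 - j]
        | none => acc.1 ++ [-1]
      (ans, acc.2.insert p.2 p.1)) ([], PySem.Dict.empty)).1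

-- ===== PRECONDITION & SPEC =====
def Spec_solution (s : String) (out : List Int) : Prop := out = solution_alt s
instance (s : String) (out : List Int) : Decidable (Spec_solution s out) := by unfold Spec_solution; infer_instance

-- ===== CLAIM (what is proved, stated in full; the proofs are below) =====
def Claim_equal_solution : Prop := ∀ (s : String), Dom_solution s → Spec_solution s (solution s)

-- ===== LEMMAS AND PROOFS =====

-- A's backward scan started at offset j finds j + (index of st in a.reverse past j) + 1, if any.
lemma pvFindBack_loop (a : List Char) (st : Char) (j : Nat) (hj : j ≤ a.length) :
    pvFindBack a st (PySem.List.pyRange (j : Int) (a.length : Int) 1) =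
      if st ∈ a.reverse.drop j then some ((j : Int) + ((a.reverse.drop j).idxOf st : Int) + 1)
      else none := by
  induction hn : a.length - j generalizing j with
  | zero =>
    have hje : j = a.length := by omega
    subst hje
    have he : PySem.List.pyRange ((a.length : Int)) ((a.length : Int)) = [] := by
      simp [PySem.List.pyRange]
    rw [he, List.drop_eq_nil_of_le (le_of_eq List.length_reverse)]
    simp [pvFindBack]
  | succ n ih =>
    have hjlt : j < a.length := by omega
    rw [PySem.List.pyRange_one_cons (by exact_mod_cast hjlt)]
    have hm1 : a.length - (j+1) < a.length := by omega
    have hidx : -1 - (j : Int) = -(((j + 1 : Nat)) : Int) := by push_cast; ring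
    have hget : PySem.List.pyGet? a (-1 - (j : Int)) = some (a[a.length - (j+1)]'hm1) := by
      rw [hidx, PySem.List.pyGet?_neg_natCast a (j+1) (by omega) (by omega),
        List.getElem?_eq_getElem hm1]
    have hrev : a.reverse.drop j = a[a.length - (j+1)]'hm1 :: a.reverse.drop (j+1) := by
      rw [List.drop_eq_getElem_cons (by simpa using hjlt)]
      congr 1
      rw [List.getElem_reverse]
      congr 1; omega
    simp only [pvFindBack, hget]
    by_cases hc : a[a.length - (j+1)]'hm1 = st
    · rw [if_pos (by rw [hc]), hrev, if_pos (by simp [hc])]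
      rw [hc, List.idxOf_cons_self]
      norm_num
    · rw [if_neg (by simp [hc])]
      rw [show ((j : Int) + 1) = (((j+1 : Nat)) : Int) by push_cast; ring]
      rw [ih (j+1) (by omega) (by omega), hrev]
      by_cases hm : st ∈ a.reverse.drop (j+1)
      · rw [if_pos hm, if_pos (by simp [hm])]
        rw [List.idxOf_cons_ne _ (by simpa using hc)]
        refine congrArg some ?_
        push_cast; ring
      · rw [if_neg hm, if_neg (by simp [hm, Ne.symm hc])]

lemma pvFindBack_spec (a : List Char) (st : Char) (h : st ∈ a) :
    pvFindBack a st (PySem.List.pyRange 0 (a.length : Int) 1) =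
      some ((a.reverse.idxOf st : Int) + 1) := by
  have := pvFindBack_loop a st 0 (Nat.zero_le _)
  simpa [List.mem_reverse, h] using this

-- the dict invariant: d maps each char of pre to its last index in pre, and nothing else
def pvInv (pre : List Char) (d : PySem.Dict Char Int) : Prop :=
  ∀ c : Char, d.get? c =
    if c ∈ pre then some ((pre.length : Int) - 1 - (pre.reverse.idxOf c : Int)) else none

lemma pvInv_step (pre : List Char) (x : Char) (d : PySem.Dict Char Int) (hd : pvInv pre d) :
    pvInv (pre ++ [x]) (d.insert x (pre.length : Int)) := by
  intro c
  by_cases hcx : c = x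
  · subst hcx
    rw [PySem.Dict.get?_insert_self]
    simp [List.reverse_append, List.idxOf_cons_self]
  · rw [PySem.Dict.get?_insert_of_ne _ _ hcx, hd c]
    by_cases hm : c ∈ pre
    · rw [if_pos hm, if_pos (by simp [hm])]
      refine congrArg some ?_
      rw [List.reverse_append]
      simp only [List.reverse_singleton, List.singleton_append]
      rw [List.idxOf_cons_ne _ (by simpa using Ne.symm hcx)]
      simp only [List.length_append, List.length_cons, List.length_nil]
      push_cast
      ring
    · rw [if_neg hm, if_neg (by simp [hm, hcx])]

-- the two loops, run from a common processed prefix, a common answer and a dict satisfying the invariant, agree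
lemma pv_main (cs : List Char) (rest pre : List Char) (acc : List Int) (d : PySem.Dict Char Int)
    (hcs : cs = pre ++ rest) (hd : pvInv pre d) :
    (PySem.List.enumerate rest (pre.length : Int)).foldl (fun answer p =>
      let a := PySem.List.slice cs (some 0) (some p.1)
      if p.2 ∈ a then
        match pvFindBack a p.2 (PySem.List.pyRange 0 (a.length : Int) 1) with
        | some v => answer ++ [v]
        | none => answer
      else answer ++ [-1]) acc =
    ((PySem.List.enumerate rest (pre.length : Int)).foldl
      (fun (acc : List Int × PySem.Dict Char Int) p =>
        let ans := match acc.2.get? p.2 with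
          | some j => acc.1 ++ [p.1 - j]
          | none => acc.1 ++ [-1]
        (ans, acc.2.insert p.2 p.1)) (acc, d)).1 := by
  induction rest generalizing pre acc d with
  | nil => simp [PySem.List.enumerate]
  | cons x rest' ih =>
    rw [PySem.List.enumerate_cons, List.foldl_cons, List.foldl_cons]
    have ha : PySem.List.slice cs (some 0) (some (pre.length : Int)) = pre := by
      rw [hcs]
      simp [PySem.List.slice_to_natCast]
    simp only [ha, hd x]
    have hstep :
        (if x ∈ pre then
          match pvFindBack pre x (PySem.List.pyRange 0 (pre.length : Int) 1) with
          | some v => acc ++ [v]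
          | none => acc
        else acc ++ [-1]) =
        (match (if x ∈ pre then some ((pre.length : Int) - 1 - (pre.reverse.idxOf x : Int)) else none) with
          | some j => acc ++ [(pre.length : Int) - j]
          | none => acc ++ [-1]) := by
      by_cases hm : x ∈ pre
      · rw [if_pos hm, if_pos hm, pvFindBack_spec pre x hm]
        have harith : (pre.length : Int) - ((pre.length : Int) - 1 - (pre.reverse.idxOf x : Int)) =
            (pre.reverse.idxOf x : Int) + 1 := by ring
        simp [harith]
      · rw [if_neg hm, if_neg hm]
    rw [hstep]
    have hen : ((pre.length : Int) + 1) = ((pre ++ [x]).length : Int) := by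
      simp only [List.length_append, List.length_cons, List.length_nil]
      push_cast
      ring
    rw [hen]
    exact ih (pre ++ [x]) _ _ (by simp [hcs]) (pvInv_step pre x d hd)

-- ===== VERDICT (by name: the statement is the Claim_ definition above) =====
theorem solution_spec : Claim_equal_solution := by
  intro s _
  unfold Spec_solution solution solution_alt
  have h := pv_main s.toList s.toList [] [] PySem.Dict.empty rfl
    (by intro c; simp [PySem.Dict.get?_empty])
  simpa using h
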